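-- pv_equiv track=rewrite | github.com/mounika558/maternalassistant | backend/utils/feature_extractor.py | detect_accelerations
-- ===== SOURCE A (Python) =====
-- def detect_accelerations(signal_data, baseline, threshold=15):
--     """Detect number of accelerations in FHR"""
--     accelerations = 0
--     in_acceleration = False
--
--     for val in signal_data:
--         if val > baseline + threshold:
--             if not in_acceleration:
--                 accelerations += 1
--                 in_acceleration = True
--         else:
--             in_acceleration = False
--
--     return accelerations
-- ===== SOURCE B (Python) =====
-- def detect_accelerations(signal_data, baseline, threshold=15):
--     """Detect number of accelerations in FHR.
--
--     Two-stage groupby-style decomposition: first run-length-encode the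
--     predicate stream (val > baseline + threshold) into maximal runs,
--     then count the runs whose flag is True."""
--     limit = baseline + threshold
--     groups = []  # run-length encoding of the predicate stream: [flag, length]
--     for val in signal_data:
--         flag = val > limit
--         if groups and groups[-1][0] == flag:
--             groups[-1][1] += 1
--         else:
--             groups.append([flag, 1])
--     return sum(1 for flag, _ in groups if flag)
-- ===== Notes on version B (the rewrite author's own statement) =====
-- stated objective: idiomatic
-- what changed: Replaces A's one-pass in_acceleration flag machine with a two-stage groupby-style pipeline: run-length-encode the boolean predicate stream into maximal runs, then count the runs whose flag is True.
import Mathlib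
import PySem

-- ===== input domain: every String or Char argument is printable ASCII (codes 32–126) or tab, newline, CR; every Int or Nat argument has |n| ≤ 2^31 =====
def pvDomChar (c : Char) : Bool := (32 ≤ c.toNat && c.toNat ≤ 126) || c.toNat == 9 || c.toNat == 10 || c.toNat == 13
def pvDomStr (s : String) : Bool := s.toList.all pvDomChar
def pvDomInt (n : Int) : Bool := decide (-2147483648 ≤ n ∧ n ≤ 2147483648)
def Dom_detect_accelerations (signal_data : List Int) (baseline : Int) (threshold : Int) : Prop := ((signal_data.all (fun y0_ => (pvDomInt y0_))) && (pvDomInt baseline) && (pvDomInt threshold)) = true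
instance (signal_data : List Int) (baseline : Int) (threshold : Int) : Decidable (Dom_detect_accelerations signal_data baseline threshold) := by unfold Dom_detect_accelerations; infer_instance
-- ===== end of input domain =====

-- B replaces A's in_acceleration flag machine with a two-stage groupby-style pipeline
-- (run-length-encode the predicate stream into maximal runs, count the True runs); objective: idiomatic.


-- ===== PORT A =====
-- literal transliteration of A's single loop with state (accelerations, in_acceleration)
def detect_accelerations (signal_data : List Int) (baseline : Int) (threshold : Int) : Int :=
  (signal_data.foldl
    (fun (st : Int × Bool) val =>
      if val > baseline + threshold then
        (if !st.2 then (st.1 + 1, true) else st)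
      else (st.1, false))
    (0, false)).1

-- ===== PORT B =====
-- one step of Source B's grouping loop: extend the last run if its flag matches, else open a new run
def pvGroupStep (limit : Int) (groups : List (Bool × Int)) (val : Int) : List (Bool × Int) :=
  let flag := decide (val > limit)
  match groups.getLast? with
  | some fc =>
      if fc.1 == flag then groups.dropLast ++ [(fc.1, fc.2 + 1)]   -- groups[-1][1] += 1
      else groups ++ [(flag, 1)]
  | none => [(flag, 1)]

-- literal transliteration of Source B: run-length-encode the predicate stream, count True runs
def detect_accelerations_alt (signal_data : List Int) (baseline : Int) (threshold : Int) : Int :=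
  let limit := baseline + threshold
  let groups := signal_data.foldl (pvGroupStep limit) []
  ((groups.filter (fun p => p.1)).length : Int)   -- sum(1 for flag, _ in groups if flag)

-- ===== PRECONDITION & SPEC =====
def Spec_detect_accelerations (signal_data : List Int) (baseline : Int) (threshold : Int) (out : Int) : Prop := out = detect_accelerations_alt signal_data baseline threshold
instance (signal_data : List Int) (baseline : Int) (threshold : Int) (out : Int) : Decidable (Spec_detect_accelerations signal_data baseline threshold out) := by unfold Spec_detect_accelerations; infer_instance

-- ===== CLAIM (what is proved, stated in full; the proofs are below) =====
def Claim_equal_detect_accelerations : Prop := ∀ (signal_data : List Int) (baseline : Int) (threshold : Int), Dom_detect_accelerations signal_data baseline threshold → Spec_detect_accelerations signal_data baseline threshold (detect_accelerations signal_data baseline threshold)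

-- ===== LEMMAS AND PROOFS =====

-- number of True runs in a group list, as an Int
def pvCountT (g : List (Bool × Int)) : Int := ((g.filter (fun p => p.1)).length : Int)

-- flag of the last run, false for the empty list (matches A's in_acceleration seed)
def pvLastFlag (g : List (Bool × Int)) : Bool :=
  match g.getLast? with
  | some fc => fc.1
  | none => false

lemma pvCountT_append (g h : List (Bool × Int)) :
    pvCountT (g ++ h) = pvCountT g + pvCountT h := by
  simp [pvCountT, List.filter_append]

-- the loop invariant tying A's state (acc, prev) to B's group list
lemma pv_main (limit : Int) :
    ∀ (s : List Int) (g : List (Bool × Int)) (acc : Int),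
      (s.foldl
        (fun (st : Int × Bool) val =>
          if val > limit then
            (if !st.2 then (st.1 + 1, true) else st)
          else (st.1, false))
        (acc, pvLastFlag g)).1 + pvCountT g
      = acc + pvCountT (s.foldl (pvGroupStep limit) g) := by
  intro s
  induction s with
  | nil => intro g acc; simp
  | cons v rest ih =>
    intro g acc
    simp only [List.foldl_cons]
    rcases hg : g.getLast? with _ | ⟨f, c⟩
    · -- g = []
      have hgnil : g = [] := List.getLast?_eq_none_iff.mp hg
      subst hgnil
      simp only [pvGroupStep, pvLastFlag, hg]
      by_cases h : v > limit
      · have := ih [(true, 1)] (acc + 1)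
        simp only [pvLastFlag, List.getLast?_singleton] at this
        simp only [h, if_true, Bool.not_false, decide_true]
        simp [pvCountT] at this ⊢
        omega
      · have := ih [(false, 1)] acc
        simp only [pvLastFlag, List.getLast?_singleton] at this
        simp only [h, if_false, decide_false]
        simp [pvCountT] at this ⊢
        omega
    · -- last run is (f, c)
      have hgne : g ≠ [] := by
        intro h; subst h; simp at hg
      have hsplit : g.dropLast ++ [(f, c)] = g := by
        rw [List.getLast?_eq_some_getLast hgne] at hg
        have h2 : g.getLast hgne = (f, c) := Option.some_inj.mp hg
        rw [← h2]
        exact List.dropLast_concat_getLast hgne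
      by_cases h : v > limit
      · by_cases hf : f = true
        · -- prev = true, flag = true: extend run, acc unchanged
          have step : pvGroupStep limit g v = g.dropLast ++ [(f, c + 1)] := by
            simp [pvGroupStep, hg, h, hf]
          have ih' := ih (g.dropLast ++ [(f, c + 1)]) acc
          have hl : pvLastFlag (g.dropLast ++ [(f, c + 1)]) = f := by
            simp [pvLastFlag]
          have hc : pvCountT (g.dropLast ++ [(f, c + 1)]) = pvCountT g := by
            rw [← hsplit, pvCountT_append, pvCountT_append]
            cases f <;> simp [pvCountT]
          rw [step]
          have hprev : pvLastFlag g = f := by simp [pvLastFlag, hg]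
          rw [hprev, hf] at *
          simp only [h, if_true, Bool.not_true, Bool.false_eq_true, if_false]
          rw [hl, hc] at ih'
          rw [hf] at ih'
          omega
        · -- prev = false, flag = true: new run, acc + 1
          have hf' : f = false := by simpa using hf
          have step : pvGroupStep limit g v = g ++ [(true, 1)] := by
            simp [pvGroupStep, hg, h, hf']
          have ih' := ih (g ++ [(true, 1)]) (acc + 1)
          have hl : pvLastFlag (g ++ [(true, 1)]) = true := by
            simp [pvLastFlag]
          have hc : pvCountT (g ++ [(true, 1)]) = pvCountT g + 1 := by
            rw [pvCountT_append]; simp [pvCountT]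
          have hprev : pvLastFlag g = false := by simp [pvLastFlag, hg, hf']
          rw [step, hprev]
          simp only [h, if_true, Bool.not_false]
          rw [hl, hc] at ih'
          omega
      · -- flag = false
        by_cases hf : f = false
        · -- prev = false, flag = false: extend run
          have step : pvGroupStep limit g v = g.dropLast ++ [(f, c + 1)] := by
            simp [pvGroupStep, hg, h, hf]
          have ih' := ih (g.dropLast ++ [(f, c + 1)]) acc
          have hl : pvLastFlag (g.dropLast ++ [(f, c + 1)]) = f := by
            simp [pvLastFlag]
          have hc : pvCountT (g.dropLast ++ [(f, c + 1)]) = pvCountT g := by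
            rw [← hsplit, pvCountT_append, pvCountT_append]
            cases f <;> simp [pvCountT]
          have hprev : pvLastFlag g = f := by simp [pvLastFlag, hg]
          rw [step, hprev, hf]
          simp only [h, if_false]
          rw [hl, hc, hf] at ih'
          omega
        · -- prev = true, flag = false: new run, acc unchanged
          have hf' : f = true := by simpa using hf
          have step : pvGroupStep limit g v = g ++ [(false, 1)] := by
            simp [pvGroupStep, hg, h, hf']
          have ih' := ih (g ++ [(false, 1)]) acc
          have hl : pvLastFlag (g ++ [(false, 1)]) = false := by
            simp [pvLastFlag]
          have hc : pvCountT (g ++ [(false, 1)]) = pvCountT g := by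
            rw [pvCountT_append]; simp [pvCountT]
          have hprev : pvLastFlag g = true := by simp [pvLastFlag, hg, hf']
          rw [step, hprev]
          simp only [h, if_false]
          rw [hl, hc] at ih'
          omega

theorem detect_accelerations_eq_alt (signal_data : List Int) (baseline threshold : Int) :
    detect_accelerations signal_data baseline threshold
      = detect_accelerations_alt signal_data baseline threshold := by
  unfold detect_accelerations detect_accelerations_alt
  have := pv_main (baseline + threshold) signal_data [] 0
  simp only [pvLastFlag, pvCountT, List.getLast?_nil, List.filter_nil, List.length_nil,
    Nat.cast_zero, add_zero, zero_add] at this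
  simpa [pvCountT] using this

-- ===== VERDICT (by name: the statement is the Claim_ definition above) =====
theorem detect_accelerations_spec : Claim_equal_detect_accelerations := by
  intro s b t _
  unfold Spec_detect_accelerations
  exact detect_accelerations_eq_alt s b t
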